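-- pv_equiv track=rewrite | github.com/elijah-potter/aoc | 3b.py | calc_total_priority
-- ===== SOURCE A (Python) =====
-- def n_to_priority(n: int) -> int:
--     if n >= 97:
--         return n - 96
--     else:
--         return n - 64 + 26
--
-- def calc_total_priority(group: list[str]) -> int:
--     if len(group) < 1:
--         return 0
--
--     bytesacks = map(lambda sack: bytearray(sack , encoding="utf8"), group)
--     priorities = list(map(lambda bytesack: set(map(n_to_priority, bytesack)), bytesacks))
--
--     cur = priorities[0]
--
--     for x in priorities:
--        cur = cur.intersection(x)
--
--     return sum(cur)
-- ===== SOURCE B (Python) =====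
-- def n_to_priority(n: int) -> int:
--     if n >= 97:
--         return n - 96
--     else:
--         return n - 64 + 26
--
-- def calc_total_priority(group: list[str]) -> int:
--     if len(group) < 1:
--         return 0
--
--     counts = {}
--     for sack in group:
--         for p in set(map(n_to_priority, bytearray(sack, encoding="utf8"))):
--             counts[p] = counts.get(p, 0) + 1
--
--     return sum(p for p, c in counts.items() if c == len(group))
-- ===== Notes on version B (the rewrite author's own statement) =====
-- stated objective: alternative
-- what changed: Replaces the fold of a running set intersection across the sacks by a single counting pass that tallies, per priority, in how many sacks it occurs, followed by a filter summing the priorities whose count equals the number of sacks.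
import Mathlib
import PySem

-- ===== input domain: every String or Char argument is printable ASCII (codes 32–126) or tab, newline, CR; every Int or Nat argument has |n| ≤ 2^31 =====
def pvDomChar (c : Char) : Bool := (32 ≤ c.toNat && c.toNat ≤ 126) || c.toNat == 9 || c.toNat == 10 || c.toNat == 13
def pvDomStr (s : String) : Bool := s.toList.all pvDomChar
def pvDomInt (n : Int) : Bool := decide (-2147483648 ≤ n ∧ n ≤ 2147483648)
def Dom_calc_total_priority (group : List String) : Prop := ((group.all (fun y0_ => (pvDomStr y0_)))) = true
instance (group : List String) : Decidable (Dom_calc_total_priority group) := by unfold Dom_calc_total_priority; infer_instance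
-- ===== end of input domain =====

-- B replaces A's running set-intersection fold by a per-priority occurrence count plus a final
-- filtering sum (alternative decomposition, same asymptotic cost).

-- ===== PORT A =====
-- n_to_priority, shared by both Pythons verbatim
def nToPriority (n : Int) : Int := if n ≥ 97 then n - 96 else n - 64 + 26

-- set(map(n_to_priority, bytearray(sack, encoding="utf8"))) — identical expression in both Pythons;
-- bytearray(s, "utf8") = the char codes, exact on the ASCII domain
def prioritySet (sack : String) : PySem.Set Int :=
  PySem.Set.ofList (sack.toList.map (fun c => nToPriority (c.toNat : Int)))

def calc_total_priority (group : List String) : Int :=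
  if group.length < 1 then 0
  else
    let priorities := group.map prioritySet
    let cur := priorities.headD []
    let cur := priorities.foldl (fun cur x => PySem.Set.inter cur x) cur
    cur.foldl (fun acc p => acc + p) 0

-- ===== PORT B =====
def calc_total_priority_alt (group : List String) : Int :=
  if group.length < 1 then 0
  else
    let counts := group.foldl
      (fun d sack => (prioritySet sack).foldl (fun d p => d.modify p 0 (· + 1)) d)
      PySem.Dict.empty
    counts.items.foldl
      (fun acc pc => if pc.2 == (group.length : Int) then acc + pc.1 else acc) 0

-- ===== PRECONDITION & SPEC =====
def Spec_calc_total_priority (group : List String) (out : Int) : Prop := out = calc_total_priority_alt group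
instance (group : List String) (out : Int) : Decidable (Spec_calc_total_priority group out) := by unfold Spec_calc_total_priority; infer_instance

-- ===== CLAIM (what is proved, stated in full; the proofs are below) =====
def Claim_equal_calc_total_priority : Prop := ∀ (group : List String), Dom_calc_total_priority group → Spec_calc_total_priority group (calc_total_priority group)

-- ===== LEMMAS AND PROOFS =====

-- foldl (+) is a shifted List.sum
theorem foldl_add_eq_sum (l : List Int) (a : Int) :
    l.foldl (fun acc p => acc + p) a = a + l.sum := by
  induction l generalizing a with
  | nil => simp
  | cons x xs ih => simp [List.foldl, ih, add_assoc]

-- the conditional-accumulate fold is the sum of the filtered first components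
theorem foldl_if_add_eq_sum (n : Int) (l : List (Int × Int)) (a : Int) :
    l.foldl (fun acc pc => if pc.2 == n then acc + pc.1 else acc) a
      = a + ((l.filter (fun pc => pc.2 == n)).map (·.1)).sum := by
  induction l generalizing a with
  | nil => simp
  | cons x xs ih =>
    rw [List.foldl_cons, List.filter_cons]
    cases hb : (x.2 == n)
    · rw [if_neg (by simp), ih, if_neg (by simp)]
    · rw [if_pos (by simp), ih, if_pos (by simp)]
      simp [add_assoc]

-- membership in the intersection fold
theorem mem_foldl_inter (l : List (List Int)) (c : List Int) (x : Int) :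
    x ∈ l.foldl (fun cur s => PySem.Set.inter cur s) c ↔ x ∈ c ∧ ∀ s ∈ l, x ∈ s := by
  induction l generalizing c with
  | nil => simp
  | cons s ss ih =>
    simp only [List.foldl, ih, PySem.Set.mem_inter, List.mem_cons]
    constructor
    · rintro ⟨⟨hc, hs⟩, hall⟩
      exact ⟨hc, by rintro t (rfl | ht); exact hs; exact hall t ht⟩
    · rintro ⟨hc, hall⟩
      exact ⟨⟨hc, hall s (Or.inl rfl)⟩, fun t ht => hall t (Or.inr ht)⟩

theorem nodup_foldl_inter (l : List (List Int)) (c : List Int) (hc : c.Nodup) :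
    (l.foldl (fun cur s => PySem.Set.inter cur s) c).Nodup := by
  induction l generalizing c with
  | nil => exact hc
  | cons s ss ih => exact ih _ (PySem.Set.nodup_inter c s hc)

theorem nodup_prioritySet (s : String) : (prioritySet s).Nodup :=
  PySem.Set.nodup_ofList _

-- counting occurrences in the concatenation of nodup lists
theorem count_flatMap_le (group : List String) (x : Int) :
    (group.flatMap prioritySet).count x ≤ group.length := by
  induction group with
  | nil => simp
  | cons g gs ih =>
    have h1 : (prioritySet g).count x ≤ 1 :=
      List.nodup_iff_count_le_one.mp (nodup_prioritySet g) x
    simp only [List.flatMap_cons, List.count_append, List.length_cons]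
    omega

theorem count_flatMap_eq_len_iff (group : List String) (x : Int) :
    (group.flatMap prioritySet).count x = group.length ↔ ∀ g ∈ group, x ∈ prioritySet g := by
  induction group with
  | nil => simp
  | cons g gs ih =>
    have h1 : (prioritySet g).count x ≤ 1 :=
      List.nodup_iff_count_le_one.mp (nodup_prioritySet g) x
    have h2 := count_flatMap_le gs x
    have h3 : (prioritySet g).count x = 1 ↔ x ∈ prioritySet g := by
      constructor
      · intro h; exact List.count_pos_iff.mp (by omega)
      · intro h; have := List.count_pos_iff.mpr h; omega
    simp only [List.flatMap_cons, List.count_append, List.length_cons, List.mem_cons]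
    constructor
    · intro h
      have hg : (prioritySet g).count x = 1 := by omega
      have hrest : (gs.flatMap prioritySet).count x = gs.length := by omega
      rintro t (rfl | ht)
      · exact h3.mp hg
      · exact (ih.mp hrest) t ht
    · intro h
      have hg : (prioritySet g).count x = 1 := h3.mpr (h g (Or.inl rfl))
      have hrest : (gs.flatMap prioritySet).count x = gs.length :=
        ih.mpr (fun t ht => h t (Or.inr ht))
      omega

-- the nested count-building loop over all sacks is the counter of the flattened priorities
theorem counts_eq_counter (group : List String) :
    group.foldl
      (fun d sack => (prioritySet sack).foldl (fun d p => d.modify p 0 (· + 1)) d)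
      PySem.Dict.empty
    = PySem.Dict.counter (group.flatMap prioritySet) := by
  rw [PySem.Dict.counter_eq_foldl]
  generalize (PySem.Dict.empty : PySem.Dict Int Int) = d
  induction group generalizing d with
  | nil => simp
  | cons g gs ih => simp [List.foldl, List.flatMap_cons, List.foldl_append, ih]

theorem calc_total_priority_spec_aux (group : List String) :
    calc_total_priority group = calc_total_priority_alt group := by
  by_cases hlen : group.length < 1
  · simp [calc_total_priority, calc_total_priority_alt, hlen]
  · obtain ⟨g0, gs, rfl⟩ : ∃ g0 gs, group = g0 :: gs := by
      cases group with
      | nil => simp at hlen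
      | cons a l => exact ⟨a, l, rfl⟩
    simp only [calc_total_priority, calc_total_priority_alt, hlen, if_false]
    rw [counts_eq_counter, PySem.Dict.items_counter, foldl_add_eq_sum, foldl_if_add_eq_sum]
    simp only [zero_add]
    set all := (g0 :: gs).flatMap prioritySet with hall
    set LA := ((g0 :: gs).map prioritySet).foldl (fun cur s => PySem.Set.inter cur s)
        (((g0 :: gs).map prioritySet).headD []) with hLA
    -- rewrite B's summed list as a plain filter of the distinct priorities
    have hLB' : (((PySem.Set.ofList all).map
          (fun k => (k, (all.count k : Int)))).filter
            (fun pc => pc.2 == ((g0 :: gs).length : Int))).map (·.1)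
        = (PySem.Set.ofList all).filter
            (fun k => (all.count k : Int) == ((g0 :: gs).length : Int)) := by
      rw [List.filter_map, List.map_map]
      simp [Function.comp_def]
    rw [hLB']
    set LB := (PySem.Set.ofList all).filter
        (fun k => (all.count k : Int) == ((g0 :: gs).length : Int)) with hLB
    have hmemA : ∀ x : Int, x ∈ LA ↔ ∀ g ∈ g0 :: gs, x ∈ prioritySet g := by
      intro x
      constructor
      · intro hx t ht
        exact ((mem_foldl_inter _ _ x).mp hx).2 _ (List.mem_map_of_mem ht)
      · intro h
        apply (mem_foldl_inter _ _ x).mpr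
        refine ⟨?_, ?_⟩
        · rw [List.map_cons, List.headD_cons]; exact h g0 (List.mem_cons_self ..)
        · intro s hs
          obtain ⟨t, ht, rfl⟩ := List.mem_map.mp hs
          exact h t ht
    have hmemB : ∀ x : Int, x ∈ LB ↔ ∀ g ∈ g0 :: gs, x ∈ prioritySet g := by
      intro x
      rw [hLB]
      constructor
      · intro hx
        obtain ⟨hmem, hcond⟩ := List.mem_filter.mp hx
        have hcnt : all.count x = (g0 :: gs).length := by
          have := of_decide_eq_true (by simpa using hcond)
          exact_mod_cast this
        exact (count_flatMap_eq_len_iff _ _).mp hcnt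
      · intro h
        have hcnt : all.count x = (g0 :: gs).length := (count_flatMap_eq_len_iff _ _).mpr h
        have hx : x ∈ all :=
          List.mem_flatMap.mpr ⟨g0, List.mem_cons_self .., h g0 (List.mem_cons_self ..)⟩
        refine List.mem_filter.mpr ⟨(PySem.Set.mem_ofList all x).mpr hx, ?_⟩
        simp [hcnt]
    have hndA : LA.Nodup := by
      rw [hLA, List.map_cons, List.headD_cons]
      exact nodup_foldl_inter _ _ (nodup_prioritySet g0)
    have hndB : LB.Nodup := List.Nodup.filter _ (PySem.Set.nodup_ofList all)
    have hperm : LA.Perm LB :=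
      (List.perm_ext_iff_of_nodup hndA hndB).mpr
        (fun x => (hmemA x).trans (hmemB x).symm)
    exact hperm.sum_eq

-- ===== VERDICT (by name: the statement is the Claim_ definition above) =====
theorem calc_total_priority_spec : Claim_equal_calc_total_priority := by
  intro group _
  exact calc_total_priority_spec_aux group
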